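-- pv_equiv track=rewrite | github.com/akgoldberg/smooth_lottery | algorithm/helpers.py | get_symmetric_intervals
-- ===== SOURCE A (Python) =====
-- import bisect
--
-- def get_symmetric_intervals(intervals):
--     # Sort intervals by A and B
--     _, order, A, B = sort_intervals(intervals, return_AB=True)
--
--     # Group intervals by their A and B values
--     partitions = {}
--     for idx in order:
--         key = (A[idx], B[idx])
--         if key not in partitions:
--             partitions[key] = []
--         partitions[key].append(idx)
--
--     # Convert the dictionary values to a list of partitions
--     partitioned_intervals = list(partitions.values())
--     # return the indices of partions
--     return partitioned_intervals
--
-- def sort_intervals(intervals, return_AB=False):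
--     n = len(intervals)
--     if n == 0:
--         return ([], [], [], []) if return_AB else ([], [])
--
--     # Extract lower and upper bounds of intervals
--     lowers = [interval[0] for interval in intervals]
--     uppers = [interval[1] for interval in intervals]
--
--     # Sort bounds for efficient binary search
--     sorted_upper = sorted(uppers)
--     sorted_lower = sorted(lowers)
--
--     # Compute A[i]: number of intervals strictly above i's lower bound
--     A = [len(sorted_lower) - bisect.bisect_right(sorted_lower, upper) for upper in uppers]
--     # Compute B[j]: number of intervals strictly below j's upper bound
--     B = [bisect.bisect_left(sorted_upper, lower) for lower in lowers]
--
--     # Sort indices by (-B[i], A[i]) criteria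
--     order = sorted(range(n), key=lambda i: (-B[i], A[i]))
--
--     # Prepare results based on return_AB flag
--     sorted_intervals = [intervals[i] for i in order]
--     if return_AB:
--         return sorted_intervals, order, A, B
--     return sorted_intervals, order
-- ===== SOURCE B (Python) =====
-- def get_symmetric_intervals(intervals):
--     # Idiomatic rewrite: direct comparison counts instead of sort+bisect ranks,
--     # and dedup-keys + per-key filter instead of dict accumulation.
--     lowers = [l for l, _ in intervals]
--     uppers = [u for _, u in intervals]
--     keys = [(sum(l > u for l in lowers), sum(u2 < l for u2 in uppers))
--             for l, u in intervals]
--     order = sorted(range(len(intervals)), key=lambda i: (-keys[i][1], keys[i][0]))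
--     distinct = list(dict.fromkeys(keys[i] for i in order))
--     return [[i for i in order if keys[i] == k] for k in distinct]
-- ===== Notes on version B (the rewrite author's own statement) =====
-- stated objective: alternative
-- what changed: Replaces the sort+binary-search (bisect) computation of the (A,B) ranks with direct comparison counting, and replaces the dict-accumulation grouping with an ordered dedup of keys followed by one per-key filter over the sorted order; trades A's O(n log n) rank step for a plainer O(n^2) one.
import Mathlib
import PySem

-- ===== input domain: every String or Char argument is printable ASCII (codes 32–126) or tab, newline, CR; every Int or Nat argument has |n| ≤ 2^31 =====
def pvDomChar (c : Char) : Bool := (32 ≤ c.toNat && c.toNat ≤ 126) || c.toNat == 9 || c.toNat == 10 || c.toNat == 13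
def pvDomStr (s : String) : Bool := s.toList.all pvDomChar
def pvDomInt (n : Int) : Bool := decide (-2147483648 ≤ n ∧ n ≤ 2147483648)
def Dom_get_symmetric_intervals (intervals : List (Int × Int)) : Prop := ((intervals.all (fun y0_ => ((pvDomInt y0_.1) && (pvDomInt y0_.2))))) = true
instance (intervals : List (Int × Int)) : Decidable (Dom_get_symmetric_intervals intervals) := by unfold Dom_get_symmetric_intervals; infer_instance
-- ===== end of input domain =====

-- B replaces A's sort+bisect rank computation by direct comparison counts and the
-- dict-accumulation grouping by an ordered key dedup plus one per-key filter (alternative decomposition, same results).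

-- ===== PORT A =====
-- port of helper sort_intervals (specialised to return_AB=True, the only way A calls it)
def pySortIntervals (intervals : List (Int × Int)) :
    List (Int × Int) × List Int × List Int × List Int :=
  if intervals.length = 0 then ([], [], [], [])
  else
    let lowers := intervals.map (fun interval => interval.1)
    let uppers := intervals.map (fun interval => interval.2)
    let sorted_upper := PySem.List.sorted uppers (fun x => x)
    let sorted_lower := PySem.List.sorted lowers (fun x => x)
    let A := uppers.map (fun upper => (sorted_lower.length : Int) - (PySem.List.bisectRight sorted_lower upper : Int))
    let B := lowers.map (fun lower => (PySem.List.bisectLeft sorted_upper lower : Int))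
    let order := PySem.List.sorted2 (PySem.List.pyRange 0 intervals.length 1)
        (fun i => -(PySem.List.pyGetD B i 0)) (fun i => PySem.List.pyGetD A i 0)
    let sorted_intervals := order.map (fun i => PySem.List.pyGetD intervals i (0, 0))
    (sorted_intervals, order, A, B)

def get_symmetric_intervals (intervals : List (Int × Int)) : List (List Int) :=
  let r := pySortIntervals intervals
  let order := r.2.1
  let A := r.2.2.1
  let B := r.2.2.2
  let partitions := order.foldl (fun d idx =>
      let key := (PySem.List.pyGetD A idx 0, PySem.List.pyGetD B idx 0)
      let d' := if d.contains key then d else d.insert key ([] : List Int)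
      d'.modify key [] (fun v => v ++ [idx])) PySem.Dict.empty
  partitions.values

-- ===== PORT B =====
def get_symmetric_intervals_alt (intervals : List (Int × Int)) : List (List Int) :=
  let lowers := intervals.map (fun p => p.1)
  let uppers := intervals.map (fun p => p.2)
  let keys := intervals.map (fun p =>
      ((lowers.countP (fun l => decide (l > p.2)) : Int),
       (uppers.countP (fun u2 => decide (u2 < p.1)) : Int)))
  let kf := fun (i : Int) => PySem.List.pyGetD keys i (0, 0)
  let order := PySem.List.sorted2 (PySem.List.pyRange 0 intervals.length 1)
      (fun i => -(kf i).2) (fun i => (kf i).1)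
  let distinct := PySem.List.dedup (order.map kf)
  distinct.map (fun c => order.filter (fun i => kf i == c))


-- ===== PRECONDITION & SPEC =====
def Spec_get_symmetric_intervals (intervals : List (Int × Int)) (out : List (List Int)) : Prop := out = get_symmetric_intervals_alt intervals
instance (intervals : List (Int × Int)) (out : List (List Int)) : Decidable (Spec_get_symmetric_intervals intervals out) := by unfold Spec_get_symmetric_intervals; infer_instance

-- ===== CLAIM (what is proved, stated in full; the proofs are below) =====
def Claim_equal_get_symmetric_intervals : Prop := ∀ (intervals : List (Int × Int)), Dom_get_symmetric_intervals intervals → Spec_get_symmetric_intervals intervals (get_symmetric_intervals intervals)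

-- ===== LEMMAS AND PROOFS =====

theorem countP_sorted_prefix (sl : List Int) (p : Int → Bool) (k : Nat)
    (hk : k ≤ sl.length)
    (h1 : ∀ (j : Nat) (hj : j < sl.length), j < k → p sl[j] = true)
    (h2 : ∀ (j : Nat) (hj : j < sl.length), k ≤ j → p sl[j] = false) :
    sl.countP p = k := by
  have hsplit : sl.countP p = (sl.take k).countP p + (sl.drop k).countP p := by
    rw [← List.countP_append, List.take_append_drop]
  have htake : (sl.take k).countP p = (sl.take k).length := by
    apply List.countP_eq_length.mpr
    intro a ha
    rw [List.mem_iff_getElem] at ha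
    obtain ⟨j, hj, rfl⟩ := ha
    rw [List.getElem_take]
    exact h1 j (by simp at hj; omega) (by simp at hj; omega)
  have hdrop : (sl.drop k).countP p = 0 := by
    apply List.countP_eq_zero.mpr
    intro a ha
    rw [List.mem_iff_getElem] at ha
    obtain ⟨j, hj, rfl⟩ := ha
    rw [List.getElem_drop]
    simp at hj
    simp [h2 (k + j) (by omega) (by omega)]
  rw [hsplit, htake, hdrop, List.length_take]
  omega

theorem bisectLeft_sorted_eq_countP (xs : List Int) (x : Int) :
    PySem.List.bisectLeft (PySem.List.sorted xs (fun v => v)) x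
      = xs.countP (fun y => decide (y < x)) := by
  set sl := PySem.List.sorted xs (fun v => v) with hsl
  have hp : sl.Pairwise (fun a b => a ≤ b) := PySem.List.sorted_pairwise xs (fun v => v)
  obtain ⟨hle, h1, h2⟩ := PySem.List.bisectLeft_spec sl x hp
  have : sl.countP (fun y => decide (y < x)) = PySem.List.bisectLeft sl x := by
    apply countP_sorted_prefix _ _ _ hle
    · intro j hj hjk; simpa using h1 j hj hjk
    · intro j hj hjk; simpa using h2 j hj hjk
  rw [← this]
  exact ((PySem.List.sorted_perm xs (fun v => v) false).countP_eq _)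

theorem bisectRight_sorted_eq_countP (xs : List Int) (x : Int) :
    ((PySem.List.sorted xs (fun v => v)).length : Int)
      - (PySem.List.bisectRight (PySem.List.sorted xs (fun v => v)) x : Int)
      = (xs.countP (fun y => decide (x < y)) : Int) := by
  set sl := PySem.List.sorted xs (fun v => v) with hsl
  have hp : sl.Pairwise (fun a b => a ≤ b) := PySem.List.sorted_pairwise xs (fun v => v)
  obtain ⟨hle, h1, h2⟩ := PySem.List.bisectRight_spec sl x hp
  have hcnt : sl.countP (fun y => !decide (x < y)) = PySem.List.bisectRight sl x := by
    apply countP_sorted_prefix _ _ _ hle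
    · intro j hj hjk; have := h1 j hj hjk; simp [not_lt, this]
    · intro j hj hjk; have := h2 j hj hjk; simp [this]
  have hperm : sl.countP (fun y => decide (x < y)) = xs.countP (fun y => decide (x < y)) :=
    (PySem.List.sorted_perm xs (fun v => v) false).countP_eq (fun y => decide (x < y))
  have htot := List.length_eq_countP_add_countP (fun y => decide (x < y)) (l := sl)
  simp only [decide_not, Bool.decide_eq_true] at htot
  omega

theorem pyGetD_map {α β : Type} (f : α → β) (xs : List α) (i : Int) (d : α) :
    PySem.List.pyGetD (xs.map f) i (f d) = f (PySem.List.pyGetD xs i d) := by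
  simp [PySem.List.pyGetD, PySem.List.pyGet?]
  cases PySem.List.pyIdx? xs.length i with
  | none => simp
  | some k =>
    simp only [Option.bind_some]
    rcases h : xs[k]? with _ | a
    · simp
    · simp

theorem dict_group_items (xs : List Int) (k : Int → Int × Int) :
    (xs.foldl (fun d i =>
        let key := k i
        let d' := if d.contains key then d else d.insert key ([] : List Int)
        d'.modify key [] (fun v => v ++ [i])) PySem.Dict.empty).items
      = (PySem.List.dedup (xs.map k)).map (fun c => (c, xs.filter (fun i => k i == c))) := by
  induction xs using List.reverseRecOn with
  | nil => rfl
  | append_singleton xs a ih =>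
    rw [List.foldl_append, List.foldl_cons, List.foldl_nil]
    set D := (xs.foldl (fun d i =>
        let key := k i
        let d' := if d.contains key then d else d.insert key ([] : List Int)
        d'.modify key [] (fun v => v ++ [i])) PySem.Dict.empty) with hD
    -- keys of D
    have hkeys : D.keys = PySem.List.dedup (xs.map k) := by
      show D.items.map (fun p => p.1) = _
      rw [ih, List.map_map]
      simp [Function.comp_def]
    have hknodup : D.keys.Nodup := by
      rw [hkeys]; simp [PySem.List.dedup, PySem.Set.nodup_ofList]
    have hcont : D.contains (k a) = decide (k a ∈ xs.map k) := by
      rw [PySem.Dict.contains_eq_decide_mem_keys, hkeys]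
      simp [PySem.List.dedup]
    have hded : PySem.List.dedup ((xs ++ [a]).map k)
        = if k a ∈ xs.map k then PySem.List.dedup (xs.map k)
          else PySem.List.dedup (xs.map k) ++ [k a] := by
      simp only [List.map_append, List.map_cons, List.map_nil, PySem.List.dedup,
        PySem.Set.ofList_eq_foldl, List.foldl_append, List.foldl_cons, List.foldl_nil]
      rw [← PySem.Set.ofList_eq_foldl]
      show PySem.Set.add (PySem.Set.ofList (xs.map k)) (k a) = _
      unfold PySem.Set.add
      by_cases h : k a ∈ xs.map k
      · have hc : (PySem.Set.ofList (List.map k xs)).contains (k a) = true :=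
          (PySem.Set.contains_iff _ _).mpr ((PySem.Set.mem_ofList _ _).mpr h)
        simp [h]
      · have hc : (PySem.Set.ofList (List.map k xs)).contains (k a) = false := by
          rw [Bool.eq_false_iff]
          intro hc
          exact h ((PySem.Set.mem_ofList _ _).mp ((PySem.Set.contains_iff _ _).mp hc))
        simp [h]
    by_cases h : k a ∈ xs.map k
    · -- key already present
      have hcontT : D.contains (k a) = true := by rw [hcont]; simp [h]
      show ((if D.contains (k a) = true then D else D.insert (k a) ([] : List Int)).modify (k a) [] fun v => v ++ [a]).items = _
      rw [if_pos hcontT]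
      show (D.insert (k a) (D.getD (k a) [] ++ [a])).items = _
      have hmem : (k a, xs.filter (fun i => k i == k a)) ∈ D.items := by
        rw [ih]
        exact List.mem_map.mpr ⟨k a, by simpa [PySem.List.dedup] using h, rfl⟩
      have hget : D.getD (k a) [] = xs.filter (fun i => k i == k a) := by
        rw [PySem.Dict.getD_eq_get?_getD, PySem.Dict.get?_of_mem_items D hmem hknodup]
        rfl
      rw [PySem.Dict.items_insert_of_contains D _ hcontT, ih, hded, if_pos h,
        List.map_map, hget]
      apply List.map_congr_left
      intro c hc
      simp only [Function.comp]
      by_cases hca : c = k a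
      · subst hca
        simp [List.filter_append]
      · have : (c == k a) = false := by simpa using hca
        simp only [this, Bool.false_eq_true, if_false]
        rw [List.filter_append]
        have : (fun i => k i == c) a = false := by simpa using fun hh => hca (by rw [← hh])
        simp [this]
    · -- new key
      have hcontD : D.contains (k a) = false := by rw [hcont]; simpa using h
      show ((if D.contains (k a) = true then D else D.insert (k a) ([] : List Int)).modify (k a) [] fun v => v ++ [a]).items = _
      rw [if_neg (by simp [hcontD])]
      set D' := D.insert (k a) ([] : List Int) with hD'
      show (D'.insert (k a) (D'.getD (k a) [] ++ [a])).items = _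
      have hitems' : D'.items = D.items ++ [(k a, [])] :=
        PySem.Dict.items_insert_of_not_contains D _ hcontD
      have hget' : D'.getD (k a) [] = [] := PySem.Dict.getD_insert_self D (k a) [] []
      have hcont' : D'.contains (k a) = true := by
        rw [hD']; exact PySem.Dict.contains_insert_self D (k a) []
      rw [PySem.Dict.items_insert_of_contains D' _ hcont', hitems', hget', ih, hded, if_neg h]
      rw [List.map_append, List.map_map, List.map_append]
      congr 1
      · apply List.map_congr_left
        intro c hc
        simp only [Function.comp]
        have hca : c ≠ k a := by
          intro hh; subst hh
          exact h (by simpa [PySem.List.dedup] using hc)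
        have hbeq : (c == k a) = false := by simpa using hca
        simp only [hbeq, Bool.false_eq_true, if_false]
        rw [List.filter_append]
        have : (fun i => k i == c) a = false := by simpa using fun hh => hca (by rw [← hh])
        simp [this]
      · simp only [List.map_cons, List.map_nil, beq_self_eq_true, if_pos]
        have hfil : xs.filter (fun i => k i == k a) = [] := by
          rw [List.filter_eq_nil_iff]
          intro i hi hki
          exact h (List.mem_map.mpr ⟨i, hi, by simpa using hki⟩)
        rw [List.filter_append]
        simp [hfil]

theorem pipeline (n : Int) (keysA keysB : List Int) (keys : List (Int × Int))
    (hA : keysA = keys.map Prod.fst) (hB : keysB = keys.map Prod.snd) :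
    ((PySem.List.sorted2 (PySem.List.pyRange 0 n 1)
        (fun i => -(PySem.List.pyGetD keysB i 0)) (fun i => PySem.List.pyGetD keysA i 0)).foldl
      (fun d idx =>
        let key := (PySem.List.pyGetD keysA idx 0, PySem.List.pyGetD keysB idx 0)
        let d' := if d.contains key then d else d.insert key ([] : List Int)
        d'.modify key [] (fun v => v ++ [idx])) PySem.Dict.empty).values
    = (PySem.List.dedup ((PySem.List.sorted2 (PySem.List.pyRange 0 n 1)
        (fun i => -(PySem.List.pyGetD keys i (0, 0)).2) (fun i => (PySem.List.pyGetD keys i (0, 0)).1)).map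
          (fun i => PySem.List.pyGetD keys i (0, 0)))).map
        (fun c => (PySem.List.sorted2 (PySem.List.pyRange 0 n 1)
          (fun i => -(PySem.List.pyGetD keys i (0, 0)).2) (fun i => (PySem.List.pyGetD keys i (0, 0)).1)).filter
            (fun i => PySem.List.pyGetD keys i (0, 0) == c)) := by
  subst hA hB
  have hf : ∀ i : Int, PySem.List.pyGetD (keys.map Prod.fst) i 0 = (PySem.List.pyGetD keys i (0, 0)).1 :=
    fun i => pyGetD_map Prod.fst keys i (0, 0)
  have hs : ∀ i : Int, PySem.List.pyGetD (keys.map Prod.snd) i 0 = (PySem.List.pyGetD keys i (0, 0)).2 :=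
    fun i => pyGetD_map Prod.snd keys i (0, 0)
  have hL1 : (fun i => -(PySem.List.pyGetD (keys.map Prod.snd) i 0))
      = (fun i => -(PySem.List.pyGetD keys i (0, 0)).2) := funext fun i => by rw [hs i]
  have hL2 : (fun i => PySem.List.pyGetD (keys.map Prod.fst) i 0)
      = (fun i => (PySem.List.pyGetD keys i (0, 0)).1) := funext fun i => hf i
  have hfun : (fun (d : PySem.Dict (Int × Int) (List Int)) idx =>
      let key := (PySem.List.pyGetD (keys.map Prod.fst) idx 0, PySem.List.pyGetD (keys.map Prod.snd) idx 0)
      let d' := if d.contains key then d else d.insert key ([] : List Int)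
      d'.modify key [] (fun v => v ++ [idx]))
      = (fun (d : PySem.Dict (Int × Int) (List Int)) i =>
      let key := PySem.List.pyGetD keys i (0, 0)
      let d' := if d.contains key then d else d.insert key ([] : List Int)
      d'.modify key [] (fun v => v ++ [i])) := by
    funext d i
    show (let key := (PySem.List.pyGetD (keys.map Prod.fst) i 0, PySem.List.pyGetD (keys.map Prod.snd) i 0)
      let d' := if d.contains key then d else d.insert key ([] : List Int)
      d'.modify key [] (fun v => v ++ [i])) = _
    rw [hf i, hs i]
  rw [hL1, hL2, hfun]
  set kf := fun (i : Int) => PySem.List.pyGetD keys i (0, 0) with hkf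
  set order := PySem.List.sorted2 (PySem.List.pyRange 0 n 1)
      (fun i => -(kf i).2) (fun i => (kf i).1) with horder
  show (order.foldl (fun d i =>
      let key := kf i
      let d' := if d.contains key then d else d.insert key ([] : List Int)
      d'.modify key [] (fun v => v ++ [i])) PySem.Dict.empty).items.map (fun p => p.2) = _
  rw [dict_group_items order kf, List.map_map]
  rfl

theorem get_symmetric_intervals_eq_alt (intervals : List (Int × Int)) :
    get_symmetric_intervals intervals = get_symmetric_intervals_alt intervals := by
  by_cases hn : intervals.length = 0
  · rw [List.length_eq_zero_iff] at hn
    subst hn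
    rfl
  · unfold get_symmetric_intervals get_symmetric_intervals_alt pySortIntervals
    rw [if_neg hn]
    have hA : (intervals.map (fun p => p.2)).map (fun upper =>
        ((PySem.List.sorted (intervals.map (fun p => p.1)) (fun x => x)).length : Int)
        - (PySem.List.bisectRight (PySem.List.sorted (intervals.map (fun p => p.1)) (fun x => x)) upper : Int))
        = (intervals.map (fun p =>
          (((intervals.map (fun p => p.1)).countP (fun l => decide (l > p.2)) : Int),
           ((intervals.map (fun p => p.2)).countP (fun u2 => decide (u2 < p.1)) : Int)))).map Prod.fst := by
      rw [List.map_map, List.map_map]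
      apply List.map_congr_left
      intro p _
      exact bisectRight_sorted_eq_countP (intervals.map (fun p => p.1)) p.2
    have hB : (intervals.map (fun p => p.1)).map (fun lower =>
        (PySem.List.bisectLeft (PySem.List.sorted (intervals.map (fun p => p.2)) (fun x => x)) lower : Int))
        = (intervals.map (fun p =>
          (((intervals.map (fun p => p.1)).countP (fun l => decide (l > p.2)) : Int),
           ((intervals.map (fun p => p.2)).countP (fun u2 => decide (u2 < p.1)) : Int)))).map Prod.snd := by
      rw [List.map_map, List.map_map]
      apply List.map_congr_left
      intro p _
      show ((PySem.List.bisectLeft (PySem.List.sorted (intervals.map (fun p => p.2)) (fun x => x)) p.1 : Nat) : Int)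
          = ((intervals.map (fun p => p.2)).countP (fun u2 => decide (u2 < p.1)) : Int)
      rw [bisectLeft_sorted_eq_countP (intervals.map (fun p => p.2)) p.1]
    exact pipeline intervals.length _ _ _ hA hB

-- ===== VERDICT (by name: the statement is the Claim_ definition above) =====
theorem get_symmetric_intervals_spec : Claim_equal_get_symmetric_intervals :=
  fun intervals _ => get_symmetric_intervals_eq_alt intervals
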